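-- pv_equiv track=rewrite | github.com/daninatalicio/estudo_python | problema_100_portas/problema_porta/doors.py | check_doors_2
-- ===== SOURCE A (Python) =====
-- def check_doors_2(n):
--     lista_portas = []
--     for i in range(n):
--         pos = i + 1
--         lista_portas.append(1)
--         if pos % 2 == 0:
--            lista_portas[i] = inverte_porta(porta=lista_portas[i])
--         if pos % 3 == 0:
--            lista_portas[i] = inverte_porta(porta=lista_portas[i])
--     return lista_portas
--
-- def inverte_porta(porta):
--    return abs(porta-1)
-- ===== SOURCE B (Python) =====
-- def check_doors_2(n):
--     # door state is periodic with period 6 in the position: precomputed lookup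
--     pattern = [1, 1, 0, 0, 0, 1]
--     return [pattern[(i + 1) % 6] for i in range(n)]
-- ===== Notes on version B (the rewrite author's own statement) =====
-- stated objective: simpler
-- what changed: Replaces the append-then-toggle-in-place loop with its two divisibility branches and the inverte_porta helper by a single precomputed period-6 lookup table indexed by pos % 6.
import Mathlib
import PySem

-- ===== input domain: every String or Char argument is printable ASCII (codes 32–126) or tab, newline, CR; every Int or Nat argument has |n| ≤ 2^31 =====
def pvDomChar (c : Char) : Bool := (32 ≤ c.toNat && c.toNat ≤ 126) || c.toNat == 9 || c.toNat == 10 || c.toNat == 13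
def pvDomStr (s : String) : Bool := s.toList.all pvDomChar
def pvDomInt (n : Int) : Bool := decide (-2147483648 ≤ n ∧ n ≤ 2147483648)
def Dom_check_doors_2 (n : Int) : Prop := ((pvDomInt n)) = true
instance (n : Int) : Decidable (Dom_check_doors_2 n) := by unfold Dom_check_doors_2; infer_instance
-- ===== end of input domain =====

-- B replaces A's two divisibility-toggle branches and helper by a period-6 lookup table (simpler).

-- ===== PORT A =====
def inverte_porta (porta : Int) : Int := |porta - 1|

def check_doors_2 (n : Int) : List Int :=
  (PySem.List.pyRange 0 n 1).foldl (fun lista_portas i =>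
    let pos := i + 1
    let lista_portas := lista_portas ++ [(1 : Int)]
    let lista_portas :=
      if PySem.Int.mod pos 2 = 0 then
        PySem.List.pySetD lista_portas i (inverte_porta (PySem.List.pyGetD lista_portas i 0))
      else lista_portas
    if PySem.Int.mod pos 3 = 0 then
      PySem.List.pySetD lista_portas i (inverte_porta (PySem.List.pyGetD lista_portas i 0))
    else lista_portas) []

-- ===== PORT B =====
def check_doors_2_alt (n : Int) : List Int :=
  let pattern : List Int := [1, 1, 0, 0, 0, 1]
  (PySem.List.pyRange 0 n 1).map (fun i => PySem.List.pyGetD pattern (PySem.Int.mod (i + 1) 6) 0)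

-- ===== PRECONDITION & SPEC =====
def Spec_check_doors_2 (n : Int) (out : List Int) : Prop := out = check_doors_2_alt n
instance (n : Int) (out : List Int) : Decidable (Spec_check_doors_2 n out) := by unfold Spec_check_doors_2; infer_instance

-- ===== CLAIM (what is proved, stated in full; the proofs are below) =====
def Claim_equal_check_doors_2 : Prop := ∀ (n : Int), Dom_check_doors_2 n → Spec_check_doors_2 n (check_doors_2 n)

-- ===== LEMMAS AND PROOFS =====

-- the per-element value of B
def pvF (i : Int) : Int := PySem.List.pyGetD [1, 1, 0, 0, 0, 1] (PySem.Int.mod (i + 1) 6) 0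

-- the body of A's foldl
def pvBody (lista_portas : List Int) (i : Int) : List Int :=
  let pos := i + 1
  let lista_portas := lista_portas ++ [(1 : Int)]
  let lista_portas :=
    if PySem.Int.mod pos 2 = 0 then
      PySem.List.pySetD lista_portas i (inverte_porta (PySem.List.pyGetD lista_portas i 0))
    else lista_portas
  if PySem.Int.mod pos 3 = 0 then
    PySem.List.pySetD lista_portas i (inverte_porta (PySem.List.pyGetD lista_portas i 0))
  else lista_portas

lemma pvF_eq (i : Int) :
    pvF i = if (i + 1) % 2 = 0 then (if (i + 1) % 3 = 0 then 1 else 0)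
            else (if (i + 1) % 3 = 0 then 0 else 1) := by
  have h6 : PySem.Int.mod (i + 1) 6 = (i + 1) % 6 := PySem.Int.mod_eq_emod_of_pos (by omega)
  have hr : (i + 1) % 6 = 0 ∨ (i + 1) % 6 = 1 ∨ (i + 1) % 6 = 2 ∨ (i + 1) % 6 = 3 ∨
      (i + 1) % 6 = 4 ∨ (i + 1) % 6 = 5 := by omega
  rcases hr with h | h | h | h | h | h <;>
    · simp only [pvF, h6, h]
      norm_num [PySem.List.pyGetD, PySem.List.pyGet?, PySem.List.pyIdx?]
      split_ifs <;> first | rfl | omega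

lemma pvBody_eq (acc : List Int) (i : Int) (hi : 0 ≤ i) (hlen : acc.length = i.toNat) :
    pvBody acc i = acc ++ [pvF i] := by
  have h2 : PySem.Int.mod (i + 1) 2 = (i + 1) % 2 := PySem.Int.mod_eq_emod_of_pos (by omega)
  have h3 : PySem.Int.mod (i + 1) 3 = (i + 1) % 3 := PySem.Int.mod_eq_emod_of_pos (by omega)
  have hget : ∀ v : Int, PySem.List.pyGetD (acc ++ [v]) i 0 = v := by
    intro v
    rw [PySem.List.pyGetD_eq_getElem (acc ++ [v]) 0 hi (by simp; omega)]
    have : i.toNat = acc.length := hlen.symm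
    simp [this]
  have hset : ∀ v w : Int, PySem.List.pySetD (acc ++ [v]) i w = acc ++ [w] := by
    intro v w
    rw [PySem.List.pySetD_of_nonneg (acc ++ [v]) w hi]
    have : i.toNat = acc.length := hlen.symm
    simp [this]
  rw [pvF_eq i]
  simp only [pvBody, h2, h3]
  by_cases c2 : (i + 1) % 2 = 0 <;> by_cases c3 : (i + 1) % 3 = 0 <;>
    simp [c2, c3, hget, hset, inverte_porta]

lemma pvFold_eq (m : Nat) :
    (PySem.List.pyRange 0 m 1).foldl pvBody [] = (PySem.List.pyRange 0 m 1).map pvF := by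
  induction m with
  | zero => simp
  | succ k ih =>
      have hsr : PySem.List.pyRange 0 ((k:Int) + 1) 1 =
          PySem.List.pyRange 0 k 1 ++ [(k:Int)] :=
        PySem.List.pyRange_one_succ_right (by exact_mod_cast Nat.zero_le k)
      have hk : ((k + 1 : Nat) : Int) = (k : Int) + 1 := by push_cast; ring
      rw [hk, hsr, List.foldl_append, List.map_append, ih, List.foldl_cons, List.foldl_nil]
      rw [pvBody_eq _ _ (by exact_mod_cast Nat.zero_le k)
        (by simp [PySem.List.length_pyRange_one])]
      simp

-- ===== VERDICT (by name: the statement is the Claim_ definition above) =====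
theorem check_doors_2_spec : Claim_equal_check_doors_2 := by
  intro n _
  show check_doors_2 n = check_doors_2_alt n
  have hA : check_doors_2 n = (PySem.List.pyRange 0 n 1).foldl pvBody [] := rfl
  have hB : check_doors_2_alt n = (PySem.List.pyRange 0 n 1).map pvF := rfl
  rw [hA, hB]
  by_cases hn : 0 ≤ n
  · have : n = ((n.toNat : Nat) : Int) := by omega
    rw [this]; exact pvFold_eq n.toNat
  · rw [PySem.List.pyRange_one_eq_nil (by omega)]; rfl
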